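-- pv_equiv track=rewrite | github.com/Angelagiraldi/AdventCode | 15_day15_part1_LensLibrary.py | process_file_content
-- ===== SOURCE A (Python) =====
-- def process_file_content(line):
--     """
--     Processes a single line from the file.
--
--     Args:
--     line (str): A string from the file, typically a line.
--
--     Returns:
--     int: The total sum calculated from the line.
--     """
--     total_sum = 0  # Initialize total sum
--     current_sum = 0  # Initialize current sum for each segment before a comma
--
--     # Iterate over each character in the line
--     for char in line:
--         if char == ',':
--             # If the character is a comma, add the current sum to the total sum
--             total_sum += current_sum
--             # Reset current sum for the next segment
--             current_sum = 0
--         else: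
--             # Update current sum based on the character's ASCII value
--             # Multiply by 17 and take modulo 256 for each character
--             current_sum = (current_sum + ord(char)) * 17 % 256
--
--     return total_sum  # Return the total sum after processing the line
-- ===== SOURCE B (Python) =====
-- def segment_hash(s):
--     acc = 0
--     for c in s:
--         acc = (acc + ord(c)) * 17 % 256
--     return acc
--
--
-- def process_file_content(line):
--     parts = line.split(',')
--     return sum(segment_hash(s) for s in parts[:-1])
-- ===== Notes on version B (the rewrite author's own statement) =====
-- stated objective: simpler
-- what changed: A's single flat character scan that handles commas inline with two running accumulators is replaced by a two-level map-reduce: split the line on the comma separator and sum a per-segment hash helper over all parts before the last separator.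
import Mathlib
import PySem

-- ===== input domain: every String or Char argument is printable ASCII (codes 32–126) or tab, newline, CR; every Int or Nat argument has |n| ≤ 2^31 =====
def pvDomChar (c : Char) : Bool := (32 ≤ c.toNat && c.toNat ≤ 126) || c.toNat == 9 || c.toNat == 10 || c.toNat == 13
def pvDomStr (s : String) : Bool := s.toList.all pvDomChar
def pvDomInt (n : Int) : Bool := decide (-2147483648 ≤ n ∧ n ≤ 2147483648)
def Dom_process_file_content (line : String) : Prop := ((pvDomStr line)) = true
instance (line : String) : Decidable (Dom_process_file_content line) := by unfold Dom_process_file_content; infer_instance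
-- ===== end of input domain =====

-- B replaces A's single flat character scan with inline comma handling by a two-level
-- map-reduce: split on ',', hash each segment before a comma, sum (objective: simpler).

-- ===== PORT A =====
-- A: one pass over the characters, carrying (total_sum, current_sum); a comma flushes
-- current_sum into total_sum, any other char updates current_sum.
def process_file_content (line : String) : Int :=
  (line.toList.foldl
    (fun (st : Int × Int) ch =>
      if ch = ',' then (st.1 + st.2, 0)
      else (st.1, PySem.Int.mod ((st.2 + (ch.toNat : Int)) * 17) 256))
    (0, 0)).1

-- ===== PORT B =====
-- Source B's segment_hash: fold the HASH step over one segment's characters from 0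
def segment_hash (s : List Char) : Int :=
  s.foldl (fun acc c => PySem.Int.mod ((acc + (c.toNat : Int)) * 17) 256) 0

-- Source B: parts = line.split(',');  sum(segment_hash(s) for s in parts[:-1])
def process_file_content_alt (line : String) : Int :=
  ((PySem.List.slice (PySem.Chars.splitOn line.toList [',']) none (some (-1))).map
    segment_hash).sum

-- ===== PRECONDITION & SPEC =====
def Spec_process_file_content (line : String) (out : Int) : Prop := out = process_file_content_alt line
instance (line : String) (out : Int) : Decidable (Spec_process_file_content line out) := by unfold Spec_process_file_content; infer_instance

-- ===== CLAIM (what is proved, stated in full; the proofs are below) =====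
def Claim_equal_process_file_content : Prop := ∀ (line : String), Dom_process_file_content line → Spec_process_file_content line (process_file_content line)

-- ===== LEMMAS AND PROOFS =====

-- the per-character hash step shared by both programs
def pvStep (a : Int) (c : Char) : Int := PySem.Int.mod ((a + (c.toNat : Int)) * 17) 256

-- structural comma-splitter: (first segment, remaining segments)
def pvSegs : List Char → List (List Char)
  | [] => [[]]
  | c :: r =>
    if c = ',' then [] :: pvSegs r
    else match pvSegs r with
         | [] => [[c]]      -- unreachable: pvSegs is never []
         | f :: rs => (c :: f) :: rs

-- hash-sum of all segments before a comma, first segment continuing from hash value a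
def pvHsum (a : Int) : List Char → Int
  | [] => 0
  | c :: r => if c = ',' then a + pvHsum 0 r else pvHsum (pvStep a c) r

-- hash of the last segment, continuing from a
def pvHlast (a : Int) : List Char → Int
  | [] => a
  | c :: r => if c = ',' then pvHlast 0 r else pvHlast (pvStep a c) r

lemma pvSegs_ne_nil (cs : List Char) : pvSegs cs ≠ [] := by
  cases cs with
  | nil => simp [pvSegs]
  | cons c r =>
    simp only [pvSegs]
    split_ifs
    · simp
    · cases h : pvSegs r <;> simp

-- A's fold, characterised by pvHsum / pvHlast
lemma pvFoldA (cs : List Char) : ∀ (t a : Int),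
    cs.foldl
      (fun (st : Int × Int) ch =>
        if ch = ',' then (st.1 + st.2, 0)
        else (st.1, PySem.Int.mod ((st.2 + (ch.toNat : Int)) * 17) 256))
      (t, a)
    = (t + pvHsum a cs, pvHlast a cs) := by
  induction cs with
  | nil => intro t a; simp [pvHsum, pvHlast]
  | cons c r ih =>
    intro t a
    by_cases hc : c = ','
    · subst hc
      rw [List.foldl_cons, if_pos rfl, ih (t + a) 0]
      simp [pvHsum, pvHlast, add_assoc]
    · rw [List.foldl_cons, if_neg hc, ih t (PySem.Int.mod ((a + (c.toNat : Int)) * 17) 256)]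
      simp [pvHsum, pvHlast, hc, pvStep]

-- go-unfolding lemmas for PySem.Chars.splitOn with separator [',']
lemma pvGo_nil (fuel : Nat) (cur : List Char) (acc : List (List Char)) :
    PySem.Chars.splitOn.go [','] (fuel+1) [] cur acc = (cur.reverse :: acc).reverse := by
  rw [PySem.Chars.splitOn.go]; simp

lemma pvGo_comma (fuel : Nat) (rest cur : List Char) (acc : List (List Char)) :
    PySem.Chars.splitOn.go [','] (fuel+1) (',' :: rest) cur acc
      = PySem.Chars.splitOn.go [','] fuel rest [] (cur.reverse :: acc) := by
  rw [PySem.Chars.splitOn.go]; simp [List.isPrefixOf]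

lemma pvGo_other (fuel : Nat) (c : Char) (rest cur : List Char) (acc : List (List Char))
    (h : c ≠ ',') :
    PySem.Chars.splitOn.go [','] (fuel+1) (c :: rest) cur acc
      = PySem.Chars.splitOn.go [','] fuel rest (c :: cur) acc := by
  rw [PySem.Chars.splitOn.go]
  simp only [List.isPrefixOf]
  split_ifs with hc
  · simp at hc; exact absurd hc.symm h
  · rfl

-- prepend pre to the first segment
def pvConsFirst (pre : List Char) : List (List Char) → List (List Char)
  | [] => [pre]
  | f :: rs => (pre ++ f) :: rs

lemma pvGo_spec (cs : List Char) : ∀ (fuel : Nat) (cur : List Char) (acc : List (List Char)),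
    cs.length < fuel →
    PySem.Chars.splitOn.go [','] fuel cs cur acc
      = acc.reverse ++ pvConsFirst cur.reverse (pvSegs cs) := by
  induction cs with
  | nil =>
    intro fuel cur acc h
    obtain ⟨f, rfl⟩ : ∃ f, fuel = f + 1 := ⟨fuel - 1, by omega⟩
    rw [pvGo_nil]
    simp [pvSegs, pvConsFirst]
  | cons c r ih =>
    intro fuel cur acc h
    obtain ⟨f, rfl⟩ : ∃ f, fuel = f + 1 := ⟨fuel - 1, by omega⟩
    by_cases hc : c = ','
    · subst hc
      rw [pvGo_comma, ih f [] _ (by simpa using h)]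
      simp only [pvSegs, pvConsFirst, List.reverse_nil]
      rcases hseg : pvSegs r with _ | ⟨fst, rs⟩
      · exact absurd hseg (pvSegs_ne_nil r)
      · simp [pvConsFirst]
    · rw [pvGo_other _ _ _ _ _ hc, ih f (c :: cur) _ (by simpa using h)]
      simp only [pvSegs, hc, if_false]
      rcases hseg : pvSegs r with _ | ⟨fst, rs⟩
      · exact absurd hseg (pvSegs_ne_nil r)
      · simp [pvConsFirst]

lemma pvSplitOn_eq_segs (cs : List Char) :
    PySem.Chars.splitOn cs [','] = pvSegs cs := by
  have := pvGo_spec cs (cs.length + 1) [] [] (by omega)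
  rw [PySem.Chars.splitOn, this]
  rcases h : pvSegs cs with _ | ⟨f, rs⟩
  · exact absurd h (pvSegs_ne_nil cs)
  · simp [pvConsFirst]

-- sum of segment hashes, first segment from a, all but the last
def pvG (a : Int) : List (List Char) → Int
  | [] => 0
  | [_] => 0
  | s :: rs => s.foldl (fun acc c => PySem.Int.mod ((acc + (c.toNat : Int)) * 17) 256) a + pvG 0 rs

lemma pvG_zero (ls : List (List Char)) :
    pvG 0 ls = (ls.dropLast.map segment_hash).sum := by
  induction ls with
  | nil => simp [pvG]
  | cons s rs ih =>
    cases rs with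
    | nil => simp [pvG]
    | cons s' rs' =>
      simp only [pvG, ih]
      simp [segment_hash]

lemma pvG_segs (cs : List Char) : ∀ (a : Int), pvG a (pvSegs cs) = pvHsum a cs := by
  induction cs with
  | nil => intro a; simp [pvSegs, pvG, pvHsum]
  | cons c r ih =>
    intro a
    by_cases hc : c = ','
    · subst hc
      rw [show pvSegs (',' :: r) = [] :: pvSegs r from by rw [pvSegs, if_pos rfl],
        show pvHsum a (',' :: r) = a + pvHsum 0 r from by rw [pvHsum, if_pos rfl]]
      rcases h : pvSegs r with _ | ⟨f, rs⟩
      · exact absurd h (pvSegs_ne_nil r)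
      · rw [← h]
        have : pvG a ([] :: pvSegs r) = a + pvG 0 (pvSegs r) := by
          rw [h]; simp [pvG]
        rw [this, ih 0]
    · rcases h : pvSegs r with _ | ⟨f, rs⟩
      · exact absurd h (pvSegs_ne_nil r)
      · simp only [pvSegs, hc, if_false, h, pvHsum]
        rw [← ih (pvStep a c), h]
        cases rs with
        | nil => simp [pvG]
        | cons s' rs' => simp [pvG, pvStep]

-- ===== VERDICT (by name: the statement is the Claim_ definition above) =====
theorem process_file_content_spec : Claim_equal_process_file_content := by
  intro line _
  unfold Spec_process_file_content process_file_content process_file_content_alt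
  rw [pvFoldA line.toList 0 0, pvSplitOn_eq_segs, PySem.List.slice_to_neg_one,
    ← pvG_zero, pvG_segs]
  simp
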